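-- pv_equiv track=rewrite | github.com/waifuai/ai-benchmarks | benchmarks/maze/maze_parsing.py | find_all_positions
-- ===== SOURCE A (Python) =====
-- from typing import List, Tuple, Dict, Set
--
-- def find_all_positions(grid: List[str], targets: Set[str]) -> Dict[str, List[Tuple[int, int]]]:
--     """Find all positions of target characters in the grid."""
--     positions = {}
--     for target in targets:
--         positions[target] = []
--
--     for i, row in enumerate(grid):
--         for j, char in enumerate(row):
--             if char in targets:
--                 positions[char].append((i, j))
--
--     return positions
-- ===== SOURCE B (Python) =====
-- def find_all_positions(grid, targets):
--     """Per-target scan: each target's position list is computed by one full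
--     grid comprehension, assembled as a dict comprehension over targets."""
--     return {
--         target: [(i, j)
--                  for i, row in enumerate(grid)
--                  for j, ch in enumerate(row)
--                  if ch == target]
--         for target in targets
--     }
-- ===== Notes on version B (the rewrite author's own statement) =====
-- stated objective: alternative
-- what changed: A makes a single index-building pass over the grid, appending each matching cell into a pre-initialised dict; B instead computes each target's position list independently by a full per-target grid comprehension inside a dict comprehension.
import Mathlib
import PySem

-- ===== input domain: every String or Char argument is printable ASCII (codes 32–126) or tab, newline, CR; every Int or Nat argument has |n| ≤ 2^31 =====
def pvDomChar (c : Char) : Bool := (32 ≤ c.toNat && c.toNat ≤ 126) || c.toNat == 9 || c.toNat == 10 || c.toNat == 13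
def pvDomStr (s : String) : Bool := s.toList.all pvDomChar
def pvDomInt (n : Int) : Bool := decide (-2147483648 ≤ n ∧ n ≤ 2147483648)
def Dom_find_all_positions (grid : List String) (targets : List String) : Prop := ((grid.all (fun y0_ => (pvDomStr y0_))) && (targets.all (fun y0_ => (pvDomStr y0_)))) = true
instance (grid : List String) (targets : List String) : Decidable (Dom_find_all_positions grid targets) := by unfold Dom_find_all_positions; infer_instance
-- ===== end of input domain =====

-- B replaces A's single index-building pass by one independent full-grid scan per target (alternative decomposition, same return value).
-- ===== PORT A =====
-- positions = {}; for target in targets: positions[target] = []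
-- for i, row in enumerate(grid): for j, char in enumerate(row): if char in targets: positions[char].append((i, j))
-- ('positions[char].append(…)' is ported as Dict.modify with default []; exact here since the guard guarantees the key is present)
def find_all_positions (grid : List String) (targets : List String) : List (String × List (Int × Int)) :=
  let positions : PySem.Dict String (List (Int × Int)) :=
    targets.foldl (fun d t => d.insert t []) PySem.Dict.empty
  let positions :=
    (PySem.List.enumerate grid 0).foldl (fun d p =>
      (PySem.List.enumerate p.2.toList 0).foldl (fun d q =>
        if targets.contains (String.ofList [q.2]) then
          d.modify (String.ofList [q.2]) [] (fun v => v ++ [(p.1, q.1)])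
        else d) d) positions
  positions.items

-- ===== PORT B =====
-- {target: [(i, j) for i, row in enumerate(grid) for j, ch in enumerate(row) if ch == target] for target in targets}
def find_all_positions_alt (grid : List String) (targets : List String) : List (String × List (Int × Int)) :=
  (targets.foldl (fun d t =>
      d.insert t ((PySem.List.enumerate grid 0).flatMap (fun p =>
        (PySem.List.enumerate p.2.toList 0).filterMap (fun q =>
          if String.ofList [q.2] == t then some (p.1, q.1) else none)))) PySem.Dict.empty).items

-- ===== PRECONDITION & SPEC =====
def Spec_find_all_positions (grid : List String) (targets : List String) (out : List (String × List (Int × Int))) : Prop := out = find_all_positions_alt grid targets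
instance (grid : List String) (targets : List String) (out : List (String × List (Int × Int))) : Decidable (Spec_find_all_positions grid targets out) := by unfold Spec_find_all_positions; infer_instance

-- ===== CLAIM (what is proved, stated in full; the proofs are below) =====
def Claim_equal_find_all_positions : Prop := ∀ (grid : List String) (targets : List String), Dom_find_all_positions grid targets → Spec_find_all_positions grid targets (find_all_positions grid targets)

-- ===== LEMMAS AND PROOFS =====

-- the grid flattened to (character-as-string, (row, col)) cells, row-major
def cellsOf (grid : List String) : List (String × (Int × Int)) :=
  (PySem.List.enumerate grid 0).flatMap (fun p =>
    (PySem.List.enumerate p.2.toList 0).map (fun q => (String.ofList [q.2], (p.1, q.1))))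

-- B's per-target value
def posOf (grid : List String) (t : String) : List (Int × Int) :=
  (PySem.List.enumerate grid 0).flatMap (fun p =>
    (PySem.List.enumerate p.2.toList 0).filterMap (fun q =>
      if String.ofList [q.2] == t then some (p.1, q.1) else none))

theorem foldl_flatMap_eq {α β γ : Type} (l : List α) (g : α → List β)
    (f : γ → β → γ) (init : γ) :
    (l.flatMap g).foldl f init = l.foldl (fun acc x => (g x).foldl f acc) init := by
  induction l generalizing init with
  | nil => rfl
  | cons a tl ih => simp [List.flatMap_cons, List.foldl_append, ih]

theorem filter_map_flatMap {α β γ : Type} (l : List α) (g : α → List β)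
    (p : β → Bool) (f : β → γ) :
    (((l.flatMap g).filter p).map f) = l.flatMap (fun x => (((g x).filter p).map f)) := by
  induction l with
  | nil => rfl
  | cons a tl ih => simp [List.flatMap_cons, List.filter_append, List.map_append, ih]

theorem row_lemma (er : List (Int × Char)) (i : Int) (k : String) :
    ((er.map (fun q => (String.ofList [q.2], (i, q.1)))).filter (fun x => x.1 == k)).map (fun x => x.2)
      = er.filterMap (fun q => if String.ofList [q.2] == k then some (i, q.1) else none) := by
  induction er with
  | nil => rfl
  | cons a tl ih =>
    simp only [List.map_cons, List.filter_cons, List.filterMap_cons]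
    by_cases h : String.ofList [a.2] == k
    · simp [h, ih]
    · simp [h, ih]

theorem posOf_eq (grid : List String) (k : String) :
    ((cellsOf grid).filter (fun x => x.1 == k)).map (fun x => x.2) = posOf grid k := by
  unfold cellsOf posOf
  rw [filter_map_flatMap]
  exact List.flatMap_congr (fun p _ => row_lemma _ _ _)

theorem getD_foldl_insert_fn {ν : Type} (f : String → ν) (k : String) (dflt : ν) :
    ∀ (ts : List String) (d : PySem.Dict String ν),
      (ts.foldl (fun d t => d.insert t (f t)) d).getD k dflt
        = if k ∈ ts then f k else d.getD k dflt := by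
  intro ts
  induction ts with
  | nil => intro d; simp
  | cons t tl ih =>
    intro d
    simp only [List.foldl_cons, ih, List.mem_cons]
    by_cases h1 : k ∈ tl
    · simp [h1]
    · by_cases h2 : k = t
      · simp [h2]
      · simp [h1, h2, PySem.Dict.getD_insert]

theorem nested_fold_eq (grid targets : List String)
    (d : PySem.Dict String (List (Int × Int))) :
    (PySem.List.enumerate grid 0).foldl (fun d p =>
      (PySem.List.enumerate p.2.toList 0).foldl (fun d q =>
        if targets.contains (String.ofList [q.2]) then
          d.modify (String.ofList [q.2]) [] (fun v => v ++ [(p.1, q.1)])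
        else d) d) d
      = ((cellsOf grid).filter (fun x => targets.contains x.1)).foldl
          (fun d x => d.modify x.1 [] (fun v => v ++ [x.2])) d := by
  rw [← PySem.List.foldl_if_eq_foldl_filter]
  unfold cellsOf
  rw [foldl_flatMap_eq]
  simp [List.foldl_map]

theorem ports_eq (grid targets : List String) :
    find_all_positions grid targets = find_all_positions_alt grid targets := by
  unfold find_all_positions find_all_positions_alt
  simp only []
  rw [nested_fold_eq]
  have hk0 : (targets.foldl (fun d t => d.insert t ([] : List (Int × Int))) PySem.Dict.empty).keys
      = PySem.Set.ofList targets := by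
    rw [PySem.Dict.keys_foldl_insert (f := fun _ _ => ([] : List (Int × Int)))]
    simp [PySem.Set.update_nil_left]
  have hkA : ((List.filter (fun x => targets.contains x.1) (cellsOf grid)).foldl
        (fun d x => d.modify x.1 [] fun v => v ++ [x.2])
        (targets.foldl (fun d t => d.insert t []) PySem.Dict.empty)).keys
      = PySem.Set.ofList targets := by
    rw [PySem.Dict.keys_foldl_modify_key (key := Prod.fst), hk0]
    rw [PySem.Set.update_eq_append_filter]
    have : (PySem.Set.ofList ((List.filter (fun x => targets.contains x.1) (cellsOf grid)).map Prod.fst)).filter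
        (fun y => !(PySem.Set.contains (PySem.Set.ofList targets) y)) = [] := by
      rw [List.filter_eq_nil_iff]
      intro a ha
      rw [PySem.Set.mem_ofList] at ha
      obtain ⟨x, hx, rfl⟩ := List.mem_map.mp ha
      have := List.of_mem_filter hx
      simp only [Bool.not_eq_true', Bool.not_eq_false]
      rw [PySem.Set.contains_iff, PySem.Set.mem_ofList]
      simpa using this
    rw [this, List.append_nil]
  have hkB : (targets.foldl
        (fun d t => d.insert t
          ((PySem.List.enumerate grid 0).flatMap (fun p =>
            (PySem.List.enumerate p.2.toList 0).filterMap
              (fun q => if String.ofList [q.2] == t then some (p.1, q.1) else none))))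
        PySem.Dict.empty).keys = PySem.Set.ofList targets := by
    rw [PySem.Dict.keys_foldl_insert]
    simp [PySem.Set.update_nil_left]
  rw [PySem.Dict.items_eq_map_keys _ (by rw [hkA]; exact PySem.Set.nodup_ofList targets) []]
  rw [PySem.Dict.items_eq_map_keys _ (by rw [hkB]; exact PySem.Set.nodup_ofList targets) []]
  rw [hkA, hkB]
  apply List.map_congr_left
  intro k hk
  rw [PySem.Set.mem_ofList] at hk
  have hcont : targets.contains k = true := by simpa using hk
  rw [PySem.Dict.getD_foldl_modify_append]
  rw [getD_foldl_insert_fn (f := fun _ => ([] : List (Int × Int)))]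
  have hff : (List.filter (fun x => targets.contains x.1) (cellsOf grid)).filter (fun x => x.1 == k)
      = (cellsOf grid).filter (fun x => x.1 == k) := by
    rw [List.filter_filter]
    apply List.filter_congr
    intro x _
    by_cases h : x.1 = k
    · simp [h, hk]
    · simp [h]
  rw [hff, posOf_eq]
  rw [getD_foldl_insert_fn (f := fun t =>
      (PySem.List.enumerate grid 0).flatMap (fun p =>
        (PySem.List.enumerate p.2.toList 0).filterMap
          (fun q => if String.ofList [q.2] == t then some (p.1, q.1) else none)))]
  simp only [hk, if_pos]
  rfl

-- ===== VERDICT (by name: the statement is the Claim_ definition above) =====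
theorem find_all_positions_spec : Claim_equal_find_all_positions := by
  intro grid targets _
  unfold Spec_find_all_positions
  exact ports_eq grid targets
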